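-- pv_equiv track=rewrite | github.com/spins-ai/turf-data-pipeline | data_completeness_report.py | extract_source_prefix
-- ===== SOURCE A (Python) =====
-- def extract_source_prefix(field_name):
--     """Extrait le prefixe source d'un champ."""
--     # Champs avec prefixe connu
--     prefixes = {
--         "enr_": "40_enrichissement",
--         "seq_": "41_sequences",
--         "rp_": "42_racing_post",
--         "met_": "43_meteo",
--         "ped_": "44_pedigree",
--         "gnn_": "45_graphe",
--         "spd_": "46_track_speed",
--         "mkt_": "49_ecart_cotes",
--         "eqp_": "equipements",
--         "rap_": "rapports",
--         "mto_": "meteo",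
--         "mch_": "marche",
--         "cnd_": "48_conditions",
--         "pgr_": "pedigree",
--         "hst_": "horse_stats",
--         "ext_": "stats_externes",
--         "hist_": "05_historique",
--         "jockey_": "06_jockeys",
--         "cotes_": "07_cotes",
--         "equip_": "09_equipements",
--         "poids_": "10_poids",
--         "sect_": "11_sectionals",
--         "sire_": "17_sire_ifce",
--         "enrich_": "40_enrichissement",
--         "reunion_": "39_reunions",
--     }
--     for prefix, source in prefixes.items():
--         if field_name.startswith(prefix):
--             return source
--     return "base"
-- ===== SOURCE B (Python) =====
-- def _source_for(head):
--     """Source pour un radical (sans le '_' final)."""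
--     if head == "enr": return "40_enrichissement"
--     elif head == "seq": return "41_sequences"
--     elif head == "rp": return "42_racing_post"
--     elif head == "met": return "43_meteo"
--     elif head == "ped": return "44_pedigree"
--     elif head == "gnn": return "45_graphe"
--     elif head == "spd": return "46_track_speed"
--     elif head == "mkt": return "49_ecart_cotes"
--     elif head == "eqp": return "equipements"
--     elif head == "rap": return "rapports"
--     elif head == "mto": return "meteo"
--     elif head == "mch": return "marche"
--     elif head == "cnd": return "48_conditions"
--     elif head == "pgr": return "pedigree"
--     elif head == "hst": return "horse_stats"
--     elif head == "ext": return "stats_externes"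
--     elif head == "hist": return "05_historique"
--     elif head == "jockey": return "06_jockeys"
--     elif head == "cotes": return "07_cotes"
--     elif head == "equip": return "09_equipements"
--     elif head == "poids": return "10_poids"
--     elif head == "sect": return "11_sectionals"
--     elif head == "sire": return "17_sire_ifce"
--     elif head == "enrich": return "40_enrichissement"
--     elif head == "reunion": return "39_reunions"
--     else: return "base"
--
--
-- def extract_source_prefix(field_name):
--     """Extrait le prefixe source d'un champ."""
--     head, sep, _tail = field_name.partition("_")
--     if sep == "":
--         return "base"
--     return _source_for(head)
-- ===== Notes on version B (the rewrite author's own statement) =====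
-- stated objective: alternative
-- what changed: Replaces the linear startswith scan over the 25-entry prefix dict by partitioning the field name at its first underscore and dispatching the stem through a direct equality chain (every known prefix ends at its only underscore, so a prefix matches iff the text up to the first underscore equals it); no dict and no scan loop remain.
import Mathlib
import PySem

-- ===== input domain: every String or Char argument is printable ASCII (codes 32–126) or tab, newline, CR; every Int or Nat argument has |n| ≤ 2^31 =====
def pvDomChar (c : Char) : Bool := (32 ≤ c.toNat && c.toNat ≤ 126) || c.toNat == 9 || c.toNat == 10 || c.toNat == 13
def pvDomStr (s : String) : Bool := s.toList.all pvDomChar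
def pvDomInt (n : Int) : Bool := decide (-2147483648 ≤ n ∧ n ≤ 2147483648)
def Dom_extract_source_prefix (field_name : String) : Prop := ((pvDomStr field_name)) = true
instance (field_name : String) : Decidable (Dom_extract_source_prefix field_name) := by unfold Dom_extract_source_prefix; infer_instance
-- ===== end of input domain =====

-- B replaces A's linear startswith scan over the 25-prefix dict by partitioning the
-- field name at its first underscore and dispatching the stem through an equality chain
-- (alternative decomposition; same observable behaviour).


-- ===== PORT A =====
-- the dict literal of A
def pvPrefixesA : PySem.Dict String String := PySem.Dict.ofList [
  ("enr_", "40_enrichissement"), ("seq_", "41_sequences"), ("rp_", "42_racing_post"),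
  ("met_", "43_meteo"), ("ped_", "44_pedigree"), ("gnn_", "45_graphe"),
  ("spd_", "46_track_speed"), ("mkt_", "49_ecart_cotes"), ("eqp_", "equipements"),
  ("rap_", "rapports"), ("mto_", "meteo"), ("mch_", "marche"),
  ("cnd_", "48_conditions"), ("pgr_", "pedigree"), ("hst_", "horse_stats"),
  ("ext_", "stats_externes"), ("hist_", "05_historique"), ("jockey_", "06_jockeys"),
  ("cotes_", "07_cotes"), ("equip_", "09_equipements"), ("poids_", "10_poids"),
  ("sect_", "11_sectionals"), ("sire_", "17_sire_ifce"), ("enrich_", "40_enrichissement"),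
  ("reunion_", "39_reunions")]

-- the 'for prefix, source in prefixes.items(): if field_name.startswith(prefix): return source' loop
def pvALoop (field_name : String) : List (String × String) → String
  | [] => "base"
  | (p, src) :: rest =>
      if PySem.Str.startswith field_name p then src else pvALoop field_name rest

def extract_source_prefix (field_name : String) : String :=
  pvALoop field_name pvPrefixesA.items

-- ===== PORT B =====
-- B's if/elif chain over the stem (the text before the first underscore)
def pvSourceFor (head : String) : String :=
  if head == "enr" then "40_enrichissement"
  else if head == "seq" then "41_sequences"
  else if head == "rp" then "42_racing_post"
  else if head == "met" then "43_meteo"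
  else if head == "ped" then "44_pedigree"
  else if head == "gnn" then "45_graphe"
  else if head == "spd" then "46_track_speed"
  else if head == "mkt" then "49_ecart_cotes"
  else if head == "eqp" then "equipements"
  else if head == "rap" then "rapports"
  else if head == "mto" then "meteo"
  else if head == "mch" then "marche"
  else if head == "cnd" then "48_conditions"
  else if head == "pgr" then "pedigree"
  else if head == "hst" then "horse_stats"
  else if head == "ext" then "stats_externes"
  else if head == "hist" then "05_historique"
  else if head == "jockey" then "06_jockeys"
  else if head == "cotes" then "07_cotes"
  else if head == "equip" then "09_equipements"
  else if head == "poids" then "10_poids"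
  else if head == "sect" then "11_sectionals"
  else if head == "sire" then "17_sire_ifce"
  else if head == "enrich" then "40_enrichissement"
  else if head == "reunion" then "39_reunions"
  else "base"

-- str.partition(sep), ported by hand (no PySem primitive): split at the FIRST occurrence
-- of sep; exact for a one-character separator such as "_" (find = first occurrence,
-- slices around it), which is the only way B uses it.
def pvPartition (s sep : String) : String × String × String :=
  let i := PySem.Str.find s sep
  if i == -1 then (s, "", "")
  else (PySem.Str.slice s none (some i), sep,
        PySem.Str.slice s (some (i + PySem.Str.len sep)) none)

def extract_source_prefix_alt (field_name : String) : String :=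
  let p := pvPartition field_name "_"
  if p.2.1 == "" then "base" else pvSourceFor p.1

-- ===== PRECONDITION & SPEC =====
def Spec_extract_source_prefix (field_name : String) (out : String) : Prop := out = extract_source_prefix_alt field_name
instance (field_name : String) (out : String) : Decidable (Spec_extract_source_prefix field_name out) := by unfold Spec_extract_source_prefix; infer_instance

-- ===== CLAIM (what is proved, stated in full; the proofs are below) =====
def Claim_equal_extract_source_prefix : Prop := ∀ (field_name : String), Dom_extract_source_prefix field_name → Spec_extract_source_prefix field_name (extract_source_prefix field_name)

-- ===== LEMMAS AND PROOFS =====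

-- find.go with sub = ['_'] returns the position of the first underscore
theorem pv_findgo_underscore (w : List Char) : ∀ (t : List Char) (k : Nat), '_' ∉ w →
    PySem.Chars.find.go ['_'] (w ++ '_' :: t) k = (k : Int) + w.length := by
  induction w with
  | nil =>
      intro t k _
      simp [PySem.Chars.find.go, List.isPrefixOf]
  | cons c w ih =>
      intro t k hw
      have hc : c ≠ '_' := fun h => hw (by simp [h])
      have hbeq : ('_' == c) = false := by
        simp [BEq.beq]; exact fun h => hc h.symm
      simp only [List.cons_append, PySem.Chars.find.go, List.isPrefixOf, hbeq,
        Bool.false_and]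
      rw [ih t (k + 1) (fun h => hw (List.mem_cons_of_mem _ h))]
      simp only [List.length_cons]; push_cast; ring

-- the split at the FIRST underscore is unique
theorem pv_split_unique : ∀ (w₁ w₂ t₁ t₂ : List Char),
    w₁ ++ '_' :: t₁ = w₂ ++ '_' :: t₂ → '_' ∉ w₁ → '_' ∉ w₂ → w₁ = w₂ ∧ t₁ = t₂ := by
  intro w₁
  induction w₁ with
  | nil =>
      intro w₂ t₁ t₂ h _ h2
      cases w₂ with
      | nil => simpa using h
      | cons c w₂ =>
          simp only [List.nil_append, List.cons_append, List.cons.injEq] at h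
          exact absurd (h.1 ▸ List.mem_cons_self) h2
  | cons c w₁ ih =>
      intro w₂ t₁ t₂ h h1 h2
      cases w₂ with
      | nil =>
          simp only [List.nil_append, List.cons_append, List.cons.injEq] at h
          exact absurd (h.1 ▸ List.mem_cons_self) h1
      | cons d w₂ =>
          simp only [List.cons_append, List.cons.injEq] at h
          have := ih w₂ t₁ t₂ h.2 (fun hm => h1 (List.mem_cons_of_mem _ hm))
            (fun hm => h2 (List.mem_cons_of_mem _ hm))
          exact ⟨by rw [h.1, this.1], this.2⟩

theorem pv_exists_split (l : List Char) (h : '_' ∈ l) :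
    ∃ w t, l = w ++ '_' :: t ∧ '_' ∉ w := by
  induction l with
  | nil => simp at h
  | cons c l ih =>
      by_cases hc : c = '_'
      · exact ⟨[], l, by simp [hc], by simp⟩
      · obtain ⟨w, t, hl, hw⟩ := ih (by rcases List.mem_cons.mp h with h | h
                                        · exact absurd h.symm hc
                                        · exact h)
        exact ⟨c :: w, t, by simp [hl], by
          intro hm
          rcases List.mem_cons.mp hm with h' | h'
          · exact hc h'.symm
          · exact hw h'⟩

-- a prefix key (a stem followed by one '_') matches field_name iff the stem equals
-- the text before field_name's first underscore
theorem pv_startswith_key (fn : String) (w t : List Char)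
    (hl : fn.toList = w ++ '_' :: t) (hw : '_' ∉ w)
    (k s : String) (hk : k.toList = s.toList ++ ['_']) (hs : '_' ∉ s.toList)
    (cand : String) (hcand : cand.toList = w) :
    PySem.Str.startswith fn k = (cand == s) := by
  by_cases he : cand = s
  · have : PySem.Str.startswith fn k = true := by
      rw [PySem.Str.startswith_eq, PySem.Chars.startswith_iff, hl, hk]
      refine ⟨t, ?_⟩
      rw [← he, hcand]; simp
    rw [this, he]; simp
  · have : PySem.Str.startswith fn k = false := by
      apply Bool.not_eq_true _ |>.mp
      intro hst
      rw [PySem.Str.startswith_eq, PySem.Chars.startswith_iff] at hst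
      obtain ⟨r, hr⟩ := hst
      rw [hk] at hr
      have : s.toList ++ '_' :: r = w ++ '_' :: t := by rw [← hl, ← hr]; simp
      have := (pv_split_unique _ _ _ _ this hs hw).1
      exact he (String.toList_inj.mp (by rw [hcand, this]))
    rw [this]
    have : (cand == s) = false := by simpa using he
    rw [this]

-- ===== VERDICT (by name: the statement is the Claim_ definition above) =====
theorem extract_source_prefix_spec : Claim_equal_extract_source_prefix := by
  intro fn _
  unfold Spec_extract_source_prefix extract_source_prefix extract_source_prefix_alt pvPartition
  by_cases h : '_' ∈ fn.toList
  · -- there is an underscore: the scan reduces to the stem dispatch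
    obtain ⟨w, t, hl, hw⟩ := pv_exists_split _ h
    have hfind : PySem.Str.find fn "_" = (w.length : Int) := by
      rw [PySem.Str.find_eq, hl]
      show PySem.Chars.find.go ("_".toList) (w ++ '_' :: t) 0 = (w.length : Int)
      rw [show "_".toList = ['_'] from rfl, pv_findgo_underscore w t 0 hw]
      simp
    have hne : ((w.length : Int) == -1) = false := by
      simp only [beq_eq_false_iff_ne, ne_eq]; intro hcon; omega
    set cand := PySem.Str.slice fn none (some (w.length : Int)) with hcdef
    have hcand : cand.toList = w := by
      rw [hcdef, PySem.Str.toList_slice, PySem.Chars.slice_eq_listSlice,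
        PySem.List.slice_to_natCast, hl]
      exact List.take_left' rfl
    simp only [hfind, hne, Bool.false_eq_true, if_false]
    have hsep : (("_" : String) == "") = false := by decide
    rw [hsep]
    simp only [Bool.false_eq_true, if_false]
    have hA : ∀ (k s : String), k.toList = s.toList ++ ['_'] → '_' ∉ s.toList →
        PySem.Str.startswith fn k = (cand == s) :=
      fun k s hk hs => pv_startswith_key fn w t hl hw k s hk hs cand hcand
    show pvALoop fn pvPrefixesA.items = pvSourceFor cand
    rw [show pvPrefixesA.items = [
      ("enr_", "40_enrichissement"), ("seq_", "41_sequences"), ("rp_", "42_racing_post"),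
      ("met_", "43_meteo"), ("ped_", "44_pedigree"), ("gnn_", "45_graphe"),
      ("spd_", "46_track_speed"), ("mkt_", "49_ecart_cotes"), ("eqp_", "equipements"),
      ("rap_", "rapports"), ("mto_", "meteo"), ("mch_", "marche"),
      ("cnd_", "48_conditions"), ("pgr_", "pedigree"), ("hst_", "horse_stats"),
      ("ext_", "stats_externes"), ("hist_", "05_historique"), ("jockey_", "06_jockeys"),
      ("cotes_", "07_cotes"), ("equip_", "09_equipements"), ("poids_", "10_poids"),
      ("sect_", "11_sectionals"), ("sire_", "17_sire_ifce"), ("enrich_", "40_enrichissement"),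
      ("reunion_", "39_reunions")] from by decide]
    simp only [pvALoop, pvSourceFor,
      hA "enr_" "enr" (by decide) (by decide), hA "seq_" "seq" (by decide) (by decide),
      hA "rp_" "rp" (by decide) (by decide), hA "met_" "met" (by decide) (by decide),
      hA "ped_" "ped" (by decide) (by decide), hA "gnn_" "gnn" (by decide) (by decide),
      hA "spd_" "spd" (by decide) (by decide), hA "mkt_" "mkt" (by decide) (by decide),
      hA "eqp_" "eqp" (by decide) (by decide), hA "rap_" "rap" (by decide) (by decide),
      hA "mto_" "mto" (by decide) (by decide), hA "mch_" "mch" (by decide) (by decide),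
      hA "cnd_" "cnd" (by decide) (by decide), hA "pgr_" "pgr" (by decide) (by decide),
      hA "hst_" "hst" (by decide) (by decide), hA "ext_" "ext" (by decide) (by decide),
      hA "hist_" "hist" (by decide) (by decide), hA "jockey_" "jockey" (by decide) (by decide),
      hA "cotes_" "cotes" (by decide) (by decide), hA "equip_" "equip" (by decide) (by decide),
      hA "poids_" "poids" (by decide) (by decide), hA "sect_" "sect" (by decide) (by decide),
      hA "sire_" "sire" (by decide) (by decide), hA "enrich_" "enrich" (by decide) (by decide),
      hA "reunion_" "reunion" (by decide) (by decide)]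
  · -- no underscore: every key mentions '_', so nothing matches, and B's sep is ""
    have hfind : PySem.Str.find fn "_" = -1 := by
      rw [PySem.Str.find_eq_neg_one_iff]
      intro hinf
      exact h (hinf.mem (by decide : '_' ∈ "_".toList))
    simp only [hfind]
    rw [show ((-1 : Int) == -1) = true from by decide]
    simp only [if_true]
    rw [show (("" : String) == "") = true from by decide]
    simp only [if_true]
    show pvALoop fn pvPrefixesA.items = "base"
    have hnostart : ∀ k : String, '_' ∈ k.toList → PySem.Str.startswith fn k = false := by
      intro k hk
      apply Bool.not_eq_true _ |>.mp
      intro hs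
      rw [PySem.Str.startswith_eq, PySem.Chars.startswith_iff] at hs
      exact h (hs.sublist.mem hk)
    rw [show pvPrefixesA.items = [
      ("enr_", "40_enrichissement"), ("seq_", "41_sequences"), ("rp_", "42_racing_post"),
      ("met_", "43_meteo"), ("ped_", "44_pedigree"), ("gnn_", "45_graphe"),
      ("spd_", "46_track_speed"), ("mkt_", "49_ecart_cotes"), ("eqp_", "equipements"),
      ("rap_", "rapports"), ("mto_", "meteo"), ("mch_", "marche"),
      ("cnd_", "48_conditions"), ("pgr_", "pedigree"), ("hst_", "horse_stats"),
      ("ext_", "stats_externes"), ("hist_", "05_historique"), ("jockey_", "06_jockeys"),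
      ("cotes_", "07_cotes"), ("equip_", "09_equipements"), ("poids_", "10_poids"),
      ("sect_", "11_sectionals"), ("sire_", "17_sire_ifce"), ("enrich_", "40_enrichissement"),
      ("reunion_", "39_reunions")] from by decide]
    simp only [pvALoop,
      hnostart "enr_" (by decide), hnostart "seq_" (by decide), hnostart "rp_" (by decide),
      hnostart "met_" (by decide), hnostart "ped_" (by decide), hnostart "gnn_" (by decide),
      hnostart "spd_" (by decide), hnostart "mkt_" (by decide), hnostart "eqp_" (by decide),
      hnostart "rap_" (by decide), hnostart "mto_" (by decide), hnostart "mch_" (by decide),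
      hnostart "cnd_" (by decide), hnostart "pgr_" (by decide), hnostart "hst_" (by decide),
      hnostart "ext_" (by decide), hnostart "hist_" (by decide), hnostart "jockey_" (by decide),
      hnostart "cotes_" (by decide), hnostart "equip_" (by decide), hnostart "poids_" (by decide),
      hnostart "sect_" (by decide), hnostart "sire_" (by decide), hnostart "enrich_" (by decide),
      hnostart "reunion_" (by decide), Bool.false_eq_true, if_false]
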